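-- pv_equiv track=rewrite | github.com/CobeySmith/Practicals | prac_05/wimbledon.py | covert_list_to_dictionary
-- ===== SOURCE A (Python) =====
-- def covert_list_to_dictionary(champions):
--     """Convert a list to a dictionary."""
--     champion_to_wins = {}
--     for champion in champions:
--         try:
--             champion_to_wins[champion] += 1
--         except KeyError:
--             champion_to_wins[champion] = 1
--     champion_to_wins = {champion: champion_to_wins[champion] for champion in sorted(champion_to_wins)}
--     return champion_to_wins
-- ===== SOURCE B (Python) =====
-- def covert_list_to_dictionary(champions):
--     """Convert a list to a dictionary (sort once, then group consecutive runs)."""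
--     ordered = sorted(champions)
--     champion_to_wins = {}
--     n = len(ordered)
--     i = 0
--     while i < n:
--         key = ordered[i]
--         j = i + 1
--         while j < n and ordered[j] == key:
--             j += 1
--         champion_to_wins[key] = j - i
--         i = j
--     return champion_to_wins
-- ===== Notes on version B (the rewrite author's own statement) =====
-- stated objective: alternative
-- what changed: Instead of counting into a dict with try/except and then rebuilding a dict over its sorted keys, B sorts the input list once and makes a single pass grouping consecutive equal runs, inserting each key with its run length so the dict is built already in ascending key order.
import Mathlib
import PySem

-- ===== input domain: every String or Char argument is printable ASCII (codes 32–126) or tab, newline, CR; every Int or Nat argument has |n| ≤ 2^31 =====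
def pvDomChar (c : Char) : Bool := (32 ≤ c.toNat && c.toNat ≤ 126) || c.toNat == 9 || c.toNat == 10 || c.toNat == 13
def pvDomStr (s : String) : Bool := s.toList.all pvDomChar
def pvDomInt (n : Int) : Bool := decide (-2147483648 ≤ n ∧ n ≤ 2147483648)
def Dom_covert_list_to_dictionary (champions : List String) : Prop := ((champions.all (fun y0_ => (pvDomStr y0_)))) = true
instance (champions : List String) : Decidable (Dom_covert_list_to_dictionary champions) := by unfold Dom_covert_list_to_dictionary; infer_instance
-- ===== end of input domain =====

-- B counts by sorting once and grouping consecutive equal runs instead of counting into a dict and re-sorting its keys (objective: alternative decomposition).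

-- ===== PORT A =====
-- count into a dict (try/except KeyError = increment if present else set to 1), then rebuild sorted by key
def pvCountDict (champions : List String) : PySem.Dict String Int :=
  champions.foldl
    (fun d c => if d.contains c then d.modify c 0 (· + 1) else d.insert c 1)
    PySem.Dict.empty

def covert_list_to_dictionary (champions : List String) : List (String × Int) :=
  ((PySem.List.sorted (pvCountDict champions).keys (fun k => k)).map
    (fun c => (c, (pvCountDict champions).getD c 0)))

-- ===== PORT B =====
-- group the sorted list into runs: recursion on the remaining suffix ordered[i:]; the inner while scanning equal elements is takeWhile, advancing i past the run is dropWhile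
def pvGroupRuns : List String → List (String × Int)
  | [] => []
  | x :: t =>
    (x, 1 + ((t.takeWhile (fun y => y == x)).length : Int)) ::
      pvGroupRuns (t.dropWhile (fun y => y == x))
  termination_by s => s.length
  decreasing_by
    exact Nat.lt_succ_of_le (List.length_dropWhile_le _ _)

def covert_list_to_dictionary_alt (champions : List String) : List (String × Int) :=
  pvGroupRuns (PySem.List.sorted champions (fun k => k))

-- ===== PRECONDITION & SPEC =====
def Spec_covert_list_to_dictionary (champions : List String) (out : List (String × Int)) : Prop := out = covert_list_to_dictionary_alt champions
instance (champions : List String) (out : List (String × Int)) : Decidable (Spec_covert_list_to_dictionary champions out) := by unfold Spec_covert_list_to_dictionary; infer_instance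

-- ===== CLAIM (what is proved, stated in full; the proofs are below) =====
def Claim_equal_covert_list_to_dictionary : Prop := ∀ (champions : List String), Dom_covert_list_to_dictionary champions → Spec_covert_list_to_dictionary champions (covert_list_to_dictionary champions)

-- ===== LEMMAS AND PROOFS =====

-- A's branching update is exactly the counter step
lemma pvStep_eq_modify (d : PySem.Dict String Int) (c : String) :
    (if d.contains c then d.modify c 0 (· + 1) else d.insert c 1) = d.modify c 0 (· + 1) := by
  by_cases h : d.contains c = true
  · simp [h]
  · simp only [Bool.not_eq_true] at h
    simp [h, PySem.Dict.modify, PySem.Dict.getD_of_not_contains d 0 h]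

lemma pvFold_eq_counter (xs : List String) :
    pvCountDict xs = PySem.Dict.counter xs := by
  rw [pvCountDict, PySem.Dict.counter_eq_foldl]
  exact List.foldl_ext _ _ _ (fun d c _ => pvStep_eq_modify d c)

-- characterisation of the run-grouping pass on a ≤-sorted list
lemma pvGroupRuns_sorted (s : List String) (hs : s.Pairwise (· ≤ ·)) :
    ((pvGroupRuns s).map Prod.fst).Pairwise (· < ·) ∧
    (∀ k, k ∈ (pvGroupRuns s).map Prod.fst ↔ k ∈ s) ∧
    pvGroupRuns s = ((pvGroupRuns s).map Prod.fst).map (fun k => (k, (s.count k : Int))) := by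
  induction s using pvGroupRuns.induct with
  | case1 => simp [pvGroupRuns]
  | case2 x t ih =>
    have ht' : t.Pairwise (· ≤ ·) := (List.pairwise_cons.mp hs).2
    have hxle : ∀ y ∈ t, x ≤ y := (List.pairwise_cons.mp hs).1
    have hrun : ∀ y ∈ t.takeWhile (fun y => y == x), y = x := by
      intro y hy
      have := List.mem_takeWhile_imp hy
      exact eq_of_beq this
    have hrest_pw : (t.dropWhile (fun y => y == x)).Pairwise (· ≤ ·) :=
      List.Pairwise.sublist (List.dropWhile_sublist _) ht'
    have hgt : ∀ y ∈ t.dropWhile (fun y => y == x), x < y := by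
      cases hrest : t.dropWhile (fun y => y == x) with
      | nil => intro y hy; simp at hy
      | cons h tl =>
        have hh : h ∈ t := (List.dropWhile_sublist _).mem (by rw [hrest]; exact List.mem_cons_self)
        have hhne : ¬(h == x) = true := by
          have := List.head?_dropWhile_not (fun y => y == x) t
          rw [hrest] at this
          simp at this; simp [this]
        have hxh : x < h := lt_of_le_of_ne (hxle h hh) (fun e => hhne (by simp [e.symm]))
        intro y hy
        rcases List.mem_cons.mp hy with rfl | hy'
        · exact hxh
        · have : h ≤ y := (List.pairwise_cons.mp (hrest ▸ hrest_pw)).1 y hy'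
          exact lt_of_lt_of_le hxh this
    obtain ⟨ihpw, ihmem, iheq⟩ := ih hrest_pw
    have hsplit : t = t.takeWhile (fun y => y == x) ++ t.dropWhile (fun y => y == x) :=
      (List.takeWhile_append_dropWhile).symm
    have hmemrun : ∀ k, k ∈ (x :: t) ↔ k = x ∨ k ∈ t.dropWhile (fun y => y == x) := by
      intro k
      constructor
      · intro hk
        rcases List.mem_cons.mp hk with rfl | hk'
        · exact Or.inl rfl
        · rw [hsplit] at hk'
          rcases List.mem_append.mp hk' with h1 | h2
          · exact Or.inl (hrun k h1)
          · exact Or.inr h2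
      · intro hk
        rcases hk with rfl | hk'
        · exact List.mem_cons_self
        · exact List.mem_cons_of_mem _ ((List.dropWhile_sublist _).mem hk')
    have hcountx : ((x :: t).count x : Int) = 1 + ((t.takeWhile (fun y => y == x)).length : Int) := by
      have hcr : (t.dropWhile (fun y => y == x)).count x = 0 := by
        rw [List.count_eq_zero]
        intro hx
        exact absurd rfl (ne_of_gt (hgt x hx)).symm.symm
      have hct : (t.takeWhile (fun y => y == x)).count x = (t.takeWhile (fun y => y == x)).length := by
        rw [List.count_eq_length]
        intro y hy
        exact (hrun y hy).symm
      rw [List.count_cons_self]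
      conv_lhs => rw [hsplit]
      rw [List.count_append, hcr, hct]
      push_cast; ring
    refine ⟨?_, ?_, ?_⟩
    · rw [pvGroupRuns]
      simp only [List.map_cons]
      refine List.pairwise_cons.mpr ⟨?_, ihpw⟩
      intro k hk
      exact hgt k ((ihmem k).mp hk)
    · intro k
      rw [pvGroupRuns]
      simp only [List.map_cons, List.mem_cons, ihmem k]
      have h2 := hmemrun k
      simp only [List.mem_cons] at h2
      exact h2.symm
    · rw [pvGroupRuns]
      simp only [List.map_cons, List.cons.injEq]
      refine ⟨?_, ?_⟩
      · exact Prod.ext rfl hcountx.symm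
      · conv_lhs => rw [iheq]
        apply List.map_congr_left
        intro k hk
        have hkrest : k ∈ t.dropWhile (fun y => y == x) := (ihmem k).mp hk
        have hkne : k ≠ x := (ne_of_gt (hgt k hkrest)).symm.symm
        have : (x :: t).count k = (t.dropWhile (fun y => y == x)).count k := by
          rw [List.count_cons_of_ne (by exact fun e => hkne e.symm) ]
          conv_lhs => rw [hsplit]
          rw [List.count_append]
          have : (t.takeWhile (fun y => y == x)).count k = 0 := by
            rw [List.count_eq_zero]
            intro hkrun
            exact hkne (hrun k hkrun)
          omega
        simp [this]

theorem pv_main (xs : List String) :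
    covert_list_to_dictionary xs = covert_list_to_dictionary_alt xs := by
  rw [covert_list_to_dictionary, covert_list_to_dictionary_alt, pvFold_eq_counter,
    PySem.Dict.keys_counter]
  have hs : (PySem.List.sorted xs (fun k => k)).Pairwise (· ≤ ·) :=
    PySem.List.sorted_pairwise xs (fun k => k)
  obtain ⟨pw, mem, eq⟩ := pvGroupRuns_sorted _ hs
  have hkeys : PySem.List.sorted (PySem.Set.ofList xs) (fun k => k) =
      (pvGroupRuns (PySem.List.sorted xs (fun k => k))).map Prod.fst := by
    apply PySem.List.sorted_eq_of_perm_of_pairwise_lt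
    · rw [List.perm_ext_iff_of_nodup (pw.imp ne_of_lt) (PySem.Set.nodup_ofList xs)]
      intro k
      rw [mem k, PySem.List.mem_sorted, PySem.Set.mem_ofList]
    · exact pw
  rw [hkeys]
  conv_rhs => rw [eq]
  apply List.map_congr_left
  intro k hk
  have : (PySem.List.sorted xs (fun k => k)).count k = xs.count k :=
    (PySem.List.sorted_perm xs (fun k => k) false).count_eq k
  simp [PySem.Dict.getD_counter, this]

-- ===== VERDICT (by name: the statement is the Claim_ definition above) =====
theorem covert_list_to_dictionary_spec : Claim_equal_covert_list_to_dictionary := by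
  intro xs _
  show _ = _
  exact pv_main xs
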